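-- pv_equiv track=rewrite | github.com/bsassoli/analista-di-bilancio | agents/estrattore_semantico.py | _trova_pagine_rilevanti
-- ===== SOURCE A (Python) =====
-- def _trova_pagine_rilevanti(
--     testi: list[dict], keywords: list[str], max_pages: int = 3
-- ) -> list[dict]:
--     """Trova le N pagine piu rilevanti per le keywords date.
--
--     Ordina per numero di keyword hit e restituisce le top N.
--     """
--     scored = []
--     for item in testi:
--         testo_lower = item["testo"].lower()
--         hits = sum(1 for kw in keywords if kw in testo_lower)
--         if hits > 0:
--             scored.append((hits, item))
--     scored.sort(key=lambda x: x[0], reverse=True)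
--     return [item for _, item in scored[:max_pages]]
-- ===== SOURCE B (Python) =====
-- def _trova_pagine_rilevanti(testi, keywords, max_pages=3):
--     """Bucket by hit count instead of sorting; emit buckets high-to-low, then slice."""
--     buckets = {}
--     for item in testi:
--         testo_lower = item["testo"].lower()
--         hits = sum(1 for kw in keywords if kw in testo_lower)
--         buckets.setdefault(hits, []).append(item)
--     ordered = []
--     for k in range(len(keywords), 0, -1):
--         ordered += buckets.get(k, [])
--     return ordered[:max_pages]
-- ===== Notes on version B (the rewrite author's own statement) =====
-- stated objective: alternative
-- what changed: Replaces the comparison sort of scored pages by a counting-sort: pages are appended to buckets keyed by hit count, buckets are emitted from len(keywords) down to 1 (which also drops the 0-hit pages), and the result is sliced to max_pages.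
-- outside the precondition, e.g. on _trova_pagine_rilevanti([{'pagina': '1'}], ['a'], 3): A raises KeyError, B raises KeyError
import Mathlib
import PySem

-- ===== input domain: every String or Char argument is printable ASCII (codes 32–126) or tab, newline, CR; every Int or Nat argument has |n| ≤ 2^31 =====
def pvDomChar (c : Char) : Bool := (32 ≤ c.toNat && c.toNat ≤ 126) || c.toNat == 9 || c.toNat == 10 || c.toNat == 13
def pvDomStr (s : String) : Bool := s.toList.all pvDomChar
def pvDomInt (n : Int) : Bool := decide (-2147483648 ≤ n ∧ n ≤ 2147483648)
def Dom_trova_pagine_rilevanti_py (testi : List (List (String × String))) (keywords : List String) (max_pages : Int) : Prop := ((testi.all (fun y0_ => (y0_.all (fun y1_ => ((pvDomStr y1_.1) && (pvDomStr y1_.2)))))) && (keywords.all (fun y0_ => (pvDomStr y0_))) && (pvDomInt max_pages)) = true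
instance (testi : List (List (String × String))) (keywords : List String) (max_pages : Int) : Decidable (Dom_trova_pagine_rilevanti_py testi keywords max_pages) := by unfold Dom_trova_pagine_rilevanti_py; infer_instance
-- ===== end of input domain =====

-- B replaces A's sort-then-slice by counting-sort buckets keyed by hit count, emitted high-to-low (objective: alternative).
-- Proved: A = B on every input where each page dict has a "testo" key (elsewhere both Pythons raise KeyError).

-- hit count of one page: `sum(1 for kw in keywords if kw in item["testo"].lower())`,
-- a subexpression both Source A and Source B contain verbatim (item["testo"] is total under Pre_)
def pvHits (keywords : List String) (item : List (String × String)) : Int :=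
  let testo_lower := PySem.Str.lower (((PySem.Dict.mk item).get? "testo").getD "")
  keywords.foldl (fun acc kw => if PySem.Str.isIn kw testo_lower then acc + 1 else acc) 0

-- ===== PORT A =====
def trova_pagine_rilevanti_py (testi : List (List (String × String))) (keywords : List String) (max_pages : Int) : List (List (String × String)) :=
  let scored := testi.foldl (fun acc item =>
    let hits := pvHits keywords item
    if hits > 0 then acc ++ [(hits, item)] else acc) ([] : List (Int × List (String × String)))
  let scored := PySem.List.sorted scored (fun x => x.1) true
  (PySem.List.slice scored none (some max_pages)).map (fun p => p.2)

-- ===== PORT B =====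
def trova_pagine_rilevanti_py_alt (testi : List (List (String × String))) (keywords : List String) (max_pages : Int) : List (List (String × String)) :=
  let buckets := testi.foldl (fun d item =>
    PySem.Dict.modify d (pvHits keywords item) [] (fun l => l ++ [item]))
    (PySem.Dict.empty : PySem.Dict Int (List (List (String × String))))
  let ordered := (PySem.List.pyRange (keywords.length : Int) 0 (-1)).foldl
    (fun acc k => acc ++ PySem.Dict.getD buckets k []) []
  PySem.List.slice ordered none (some max_pages)

-- ===== PRECONDITION & SPEC =====
-- Pre_ excludes exactly the inputs where a page dict lacks the "testo" key: there both A and B raise KeyError.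
def Pre_trova_pagine_rilevanti_py (testi : List (List (String × String))) (keywords : List String) (max_pages : Int) : Prop :=
  ∀ item ∈ testi, ((PySem.Dict.mk item).get? "testo").isSome = true
instance (testi : List (List (String × String))) (keywords : List String) (max_pages : Int) : Decidable (Pre_trova_pagine_rilevanti_py testi keywords max_pages) := by unfold Pre_trova_pagine_rilevanti_py; infer_instance
def pvWitness_trova_pagine_rilevanti_py : (List (List (String × String))) × List String × Int :=
  ([[("testo", "Ciao mondo"), ("pagina", "1")], [("testo", "altro")]], ["ciao", "mondo"], 3)
def Spec_trova_pagine_rilevanti_py (testi : List (List (String × String))) (keywords : List String) (max_pages : Int) (out : List (List (String × String))) : Prop := out = trova_pagine_rilevanti_py_alt testi keywords max_pages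
instance (testi : List (List (String × String))) (keywords : List String) (max_pages : Int) (out : List (List (String × String))) : Decidable (Spec_trova_pagine_rilevanti_py testi keywords max_pages out) := by unfold Spec_trova_pagine_rilevanti_py; infer_instance

-- ===== CLAIM (what is proved, stated in full; the proofs are below) =====
def Claim_equal_trova_pagine_rilevanti_py : Prop := ∀ (testi : List (List (String × String))) (keywords : List String) (max_pages : Int), Dom_trova_pagine_rilevanti_py testi keywords max_pages → Pre_trova_pagine_rilevanti_py testi keywords max_pages → Spec_trova_pagine_rilevanti_py testi keywords max_pages (trova_pagine_rilevanti_py testi keywords max_pages)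

-- ===== LEMMAS AND PROOFS =====

-- the witness satisfies Dom_ and Pre_
theorem pvWitness_ok : Dom_trova_pagine_rilevanti_py pvWitness_trova_pagine_rilevanti_py.1 pvWitness_trova_pagine_rilevanti_py.2.1 pvWitness_trova_pagine_rilevanti_py.2.2 ∧ Pre_trova_pagine_rilevanti_py pvWitness_trova_pagine_rilevanti_py.1 pvWitness_trova_pagine_rilevanti_py.2.1 pvWitness_trova_pagine_rilevanti_py.2.2 := by decide

-- hit counts are bounded by the number of keywords and pvHits is a countP
theorem pvHits_eq_countP (keywords : List String) (item : List (String × String)) :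
    pvHits keywords item = (keywords.countP
      (fun kw => PySem.Str.isIn kw (PySem.Str.lower (((PySem.Dict.mk item).get? "testo").getD ""))) : Int) := by
  simp [pvHits, PySem.List.foldl_if_add_one]

theorem pvHits_le (keywords : List String) (item : List (String × String)) :
    pvHits keywords item ≤ (keywords.length : Int) := by
  rw [pvHits_eq_countP]
  exact_mod_cast List.countP_le_length

-- insertBy skips a prefix it is not `before`
theorem insertBy_append {α : Type} (before : α → α → Bool) (x : α) (F S : List α)
    (h : ∀ y ∈ F, before x y = false) :
    PySem.List.insertBy before x (F ++ S) = F ++ PySem.List.insertBy before x S := by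
  induction F with
  | nil => simp
  | cons y F ih =>
    simp only [List.cons_append, PySem.List.insertBy, h y (by simp)]
    simp only [Bool.false_eq_true, if_false, List.cons.injEq, true_and]
    exact ih (fun z hz => h z (by simp [hz]))

-- insertBy at the very front
theorem insertBy_front {α : Type} (before : α → α → Bool) (x : α) (S : List α)
    (h : ∀ y ∈ S, before x y = true) :
    PySem.List.insertBy before x S = x :: S := by
  cases S with
  | nil => rfl
  | cons y S => simp [PySem.List.insertBy, h y (by simp)]

-- stable reverse sort: elements with the maximal key come first, in original order
theorem sorted_rev_filter_max {α : Type} (m : Int) :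
    ∀ (xs : List (Int × α)), (∀ p ∈ xs, p.1 ≤ m) →
      PySem.List.sorted xs (fun p => p.1) true =
        xs.filter (fun p => p.1 == m) ++
          PySem.List.sorted (xs.filter (fun p => p.1 != m)) (fun p => p.1) true := by
  intro xs
  induction xs using List.reverseRecOn with
  | nil => intro _; rfl
  | append_singleton ys x ih =>
    intro h
    have hys : ∀ p ∈ ys, p.1 ≤ m := fun p hp => h p (by simp [hp])
    have hx : x.1 ≤ m := h x (by simp)
    have hmemF : ∀ y ∈ ys.filter (fun p => p.1 == m), (y.1 : Int) = m := by
      intro y hy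
      have := List.of_mem_filter hy
      simpa using this
    have hmemS : ∀ y ∈ PySem.List.sorted (ys.filter (fun p => p.1 != m)) (fun p => p.1) true, y.1 < m := by
      intro y hy
      rw [PySem.List.mem_sorted] at hy
      have h1 := List.of_mem_filter hy
      have h2 := List.mem_of_mem_filter hy
      have := hys y h2
      simp only [bne_iff_ne, ne_eq] at h1
      omega
    rw [PySem.List.sorted_rev_eq_foldl_insertBy, List.foldl_append, List.foldl_cons, List.foldl_nil,
        ← PySem.List.sorted_rev_eq_foldl_insertBy, ih hys]
    by_cases hxm : x.1 = m
    · rw [insertBy_append _ _ _ _ (by intro y hy; simp [hmemF y hy, hxm]),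
          insertBy_front _ _ _ (by intro y hy; simp only [decide_eq_true_eq]; rw [hxm]; exact hmemS y hy)]
      simp [List.filter_append, hxm]
    · have hS : PySem.List.sorted (ys.filter (fun p => p.1 != m) ++ [x]) (fun p => p.1) true
          = PySem.List.insertBy (fun a b => decide (b.1 < a.1)) x
              (PySem.List.sorted (ys.filter (fun p => p.1 != m)) (fun p => p.1) true) := by
        rw [PySem.List.sorted_rev_eq_foldl_insertBy, List.foldl_append, List.foldl_cons,
            List.foldl_nil, ← PySem.List.sorted_rev_eq_foldl_insertBy]
      rw [insertBy_append _ _ _ _ (by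
          intro y hy
          have := hmemF y hy
          simp only [decide_eq_false_iff_not, not_lt]
          omega)]
      simp [List.filter_append, hxm, hS]

-- stable reverse sort with keys in [1, n] is the concatenation of the key-buckets, high to low
theorem sorted_rev_buckets {α : Type} :
    ∀ (n : Nat) (xs : List (Int × α)), (∀ p ∈ xs, 1 ≤ p.1 ∧ p.1 ≤ (n : Int)) →
      PySem.List.sorted xs (fun p => p.1) true =
        (PySem.List.pyRange (n : Int) 0 (-1)).flatMap (fun k => xs.filter (fun p => p.1 == k)) := by
  intro n
  induction n with
  | zero =>
    intro xs h
    have : xs = [] := by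
      cases xs with
      | nil => rfl
      | cons p ps => exact absurd (h p (by simp)) (by push_cast; omega)
    subst this
    simp [PySem.List.pyRange_neg_one_eq_nil]
    rfl
  | succ n ih =>
    intro xs h
    have hcons : PySem.List.pyRange ((n + 1 : Nat) : Int) 0 (-1)
        = ((n + 1 : Nat) : Int) :: PySem.List.pyRange (n : Int) 0 (-1) := by
      have := PySem.List.pyRange_neg_one_cons (a := ((n + 1 : Nat) : Int)) (b := 0) (by push_cast; omega)
      simpa using this
    rw [sorted_rev_filter_max ((n + 1 : Nat) : Int) xs (fun p hp => (h p hp).2), hcons,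
        List.flatMap_cons]
    congr 1
    rw [ih (xs.filter (fun p => p.1 != ((n + 1 : Nat) : Int))) (by
      intro p hp
      have h1 := List.of_mem_filter hp
      have h2 := h p (List.mem_of_mem_filter hp)
      simp only [bne_iff_ne, ne_eq] at h1
      push_cast at h2 ⊢
      omega)]
    apply List.flatMap_congr
    intro k hk
    rw [PySem.List.mem_pyRange_neg_one] at hk
    rw [List.filter_filter]
    apply List.filter_congr
    intro p _
    rcases eq_or_ne p.1 k with hpk | hpk
    · simp [hpk]
      omega
    · simp [hpk]

-- map commutes with a [:b] slice
theorem map_slice_to {α β : Type} (f : α → β) (xs : List α) (b : Int) :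
    (PySem.List.slice xs none (some b)).map f = PySem.List.slice (xs.map f) none (some b) := by
  simp [PySem.List.slice, List.map_take]

-- ===== VERDICT (by name: the statement is the Claim_ definition above) =====
theorem trova_pagine_rilevanti_py_spec : Claim_equal_trova_pagine_rilevanti_py := by
  intro testi keywords max_pages _hDom _hPre
  unfold Spec_trova_pagine_rilevanti_py
  simp only [trova_pagine_rilevanti_py, trova_pagine_rilevanti_py_alt]
  -- A side: scored as filter+map
  rw [PySem.List.foldl_append_ite (p := fun item => pvHits keywords item > 0)
      (f := fun item => (pvHits keywords item, item))]
  -- sorted scored = bucket concatenation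
  rw [sorted_rev_buckets keywords.length _ (by
    intro p hp
    simp only [List.nil_append, List.mem_map, List.mem_filter, decide_eq_true_eq] at hp
    obtain ⟨item, ⟨_, hpos⟩, rfl⟩ := hp
    exact ⟨by omega, pvHits_le keywords item⟩)]
  -- B side: buckets dict lookups are filters
  have hbuck : ∀ k : Int,
      PySem.Dict.getD (testi.foldl (fun d item =>
        PySem.Dict.modify d (pvHits keywords item) [] (fun l => l ++ [item]))
        (PySem.Dict.empty : PySem.Dict Int (List (List (String × String))))) k []
        = (testi.filter (fun item => pvHits keywords item == k)) := by
    intro k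
    have := PySem.Dict.getD_foldl_modify_append
      (l := testi.map (fun item => (pvHits keywords item, item))) (d := (PySem.Dict.empty : PySem.Dict Int (List (List (String × String))))) (c := k)
    rw [List.foldl_map] at this
    rw [this, List.filter_map, List.map_map]
    simp [Function.comp_def, PySem.Dict.empty, PySem.Dict.getD, PySem.Dict.get?]
  simp only [hbuck]
  rw [PySem.List.foldl_append_eq_flatMap, map_slice_to]
  congr 1
  rw [List.map_flatMap]
  apply List.flatMap_congr
  intro k hk
  rw [PySem.List.mem_pyRange_neg_one] at hk
  simp only [List.nil_append]
  rw [List.filter_map, List.map_map, List.filter_filter]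
  simp only [Function.comp_def, List.map_id_fun', id]
  apply List.filter_congr
  intro item _
  rcases eq_or_ne (pvHits keywords item) k with hik | hik
  · simp [hik, hk.1]
  · simp [hik]
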